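-- pv_equiv track=rewrite | github.com/gorkemyar/Sabanci_Courses | CS411/HW2/hw2_helper.py | ASCII2bin
-- ===== SOURCE A (Python) =====
-- def ASCII2bin(msg):
--     M_i = []
--     Mlen = len(msg)
--     for i in range(0,Mlen):
--         ascii_no = ord(msg[i])
--         ascii_bin = bin(ascii_no)
--         char_len = len(ascii_bin)
--         if(char_len<9):
--             for j in range(0,9-char_len):
--                 M_i.append(0)
--         for j in range(2,char_len):
--             M_i.append(int(ascii_bin[j]))
--     return M_i
-- ===== SOURCE B (Python) =====
-- def ASCII2bin(msg):
--     bits = []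
--     for c in msg:
--         n = ord(c)
--         width = max(7, n.bit_length())
--         for k in range(width - 1, -1, -1):
--             bits.append((n >> k) & 1)
--     return bits
-- ===== Notes on version B (the rewrite author's own statement) =====
-- stated objective: idiomatic
-- what changed: B extracts each bit arithmetically ((n >> k) & 1 over k = width-1..0 with width = max(7, n.bit_length())) instead of building the string bin(n), measuring its length, emitting a separate zero-padding loop and converting sliced digit characters back to ints.
import Mathlib
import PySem

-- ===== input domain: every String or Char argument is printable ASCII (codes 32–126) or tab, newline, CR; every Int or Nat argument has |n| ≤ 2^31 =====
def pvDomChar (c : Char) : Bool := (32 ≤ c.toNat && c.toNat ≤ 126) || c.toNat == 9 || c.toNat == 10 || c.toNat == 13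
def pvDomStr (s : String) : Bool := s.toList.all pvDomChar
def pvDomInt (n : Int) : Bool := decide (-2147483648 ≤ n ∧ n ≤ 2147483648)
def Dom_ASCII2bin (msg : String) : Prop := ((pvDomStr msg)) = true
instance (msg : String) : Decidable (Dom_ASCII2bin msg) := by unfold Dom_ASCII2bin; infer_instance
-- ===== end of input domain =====

-- B replaces A's bin(n)-string slicing and separate zero-padding loop by arithmetic
-- bit extraction ((n >>> k) &&& 1 over k = width-1..0, width = max 7 (bit_length n)); idiomatic, same cost.


-- ===== PORT A =====
-- helper modelling Python's bin(n) for n ≥ 0: '0b' followed by the binary digits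
-- (fuel-structural so the kernel can evaluate it; fuel n suffices since n needs ≤ n digits)
def pyBinAux : Nat → Nat → List Char → List Char
  | 0, _, acc => acc
  | fuel + 1, n, acc =>
      if n = 0 then acc
      else pyBinAux fuel (n / 2) ((if n % 2 = 1 then '1' else '0') :: acc)

def pyBin (n : Nat) : List Char :=
  '0' :: 'b' :: (if n = 0 then ['0'] else pyBinAux n n [])

def ASCII2bin (msg : String) : List Int :=
  msg.toList.foldl (fun M_i ch =>
    let ascii_no := ch.toNat
    let ascii_bin := pyBin ascii_no
    let char_len := ascii_bin.length
    let M_i := if char_len < 9 then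
        (List.range (9 - char_len)).foldl (fun a _ => a ++ [(0 : Int)]) M_i
      else M_i
    (List.range' 2 (char_len - 2)).foldl
      (fun a j => a ++ [((ascii_bin.getD j '0').toNat : Int) - 48]) M_i) []

-- ===== PORT B =====
-- helper modelling Python's int.bit_length() (fuel-structural; fuel n suffices)
def bitLenAux : Nat → Nat → Nat
  | 0, _ => 0
  | fuel + 1, n => if n = 0 then 0 else bitLenAux fuel (n / 2) + 1

def bitLen (n : Nat) : Nat := bitLenAux n n

def ASCII2bin_alt (msg : String) : List Int :=
  msg.toList.foldl (fun bits ch =>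
    let n := ch.toNat
    let width := max 7 (bitLen n)
    (List.range width).reverse.foldl
      (fun a k => a ++ [(((n >>> k) &&& 1 : Nat) : Int)]) bits) []

-- ===== PRECONDITION & SPEC =====
def Spec_ASCII2bin (msg : String) (out : List Int) : Prop := out = ASCII2bin_alt msg
instance (msg : String) (out : List Int) : Decidable (Spec_ASCII2bin msg out) := by unfold Spec_ASCII2bin; infer_instance

-- ===== CLAIM (what is proved, stated in full; the proofs are below) =====
def Claim_equal_ASCII2bin : Prop := ∀ (msg : String), Dom_ASCII2bin msg → Spec_ASCII2bin msg (ASCII2bin msg)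

-- ===== LEMMAS AND PROOFS =====

-- A's per-character contribution, as a function of the character code
def gA (n : Nat) : List Int :=
  let ascii_bin := pyBin n
  let char_len := ascii_bin.length
  let M_i : List Int := if char_len < 9 then
      (List.range (9 - char_len)).foldl (fun a _ => a ++ [(0 : Int)]) []
    else []
  (List.range' 2 (char_len - 2)).foldl
    (fun a j => a ++ [((ascii_bin.getD j '0').toNat : Int) - 48]) M_i

-- B's per-character contribution
def gB (n : Nat) : List Int :=
  (List.range (max 7 (bitLen n))).reverse.foldl
    (fun a k => a ++ [(((n >>> k) &&& 1 : Nat) : Int)]) []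

theorem foldl_app1 {α β : Type} (f : β → α) :
    ∀ (l : List β) (init : List α),
      l.foldl (fun a x => a ++ [f x]) init = init ++ l.map f := by
  intro l
  induction l with
  | nil => simp
  | cons x xs ih => intro init; simp [List.foldl_cons, ih, List.append_assoc]

theorem foldl_shift {α β : Type} (step : List α → β → List α)
    (h : ∀ acc x, step acc x = acc ++ step [] x) :
    ∀ (l : List β) (acc : List α),
      l.foldl step acc = acc ++ l.flatMap (fun x => step [] x) := by
  intro l
  induction l with
  | nil => simp
  | cons x xs ih => intro acc; simp [List.foldl_cons, ih, h acc x, List.append_assoc]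

theorem flatMap_congr_mem {α β : Type} (f g : α → List β) :
    ∀ l : List α, (∀ x ∈ l, f x = g x) → l.flatMap f = l.flatMap g := by
  intro l
  induction l with
  | nil => intro _; rfl
  | cons x xs ih =>
      intro h
      simp only [List.flatMap_cons]
      rw [h x (by simp), ih (fun y hy => h y (by simp [hy]))]

theorem A_flat (msg : String) :
    ASCII2bin msg = msg.toList.flatMap (fun ch => gA ch.toNat) := by
  unfold ASCII2bin
  rw [foldl_shift]
  · simp [gA]
  · intro acc ch
    simp only [foldl_app1]
    simp
    split_ifs <;> simp [List.append_assoc]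

theorem B_flat (msg : String) :
    ASCII2bin_alt msg = msg.toList.flatMap (fun ch => gB ch.toNat) := by
  unfold ASCII2bin_alt
  rw [foldl_shift]
  · simp [gB]
  · intro acc ch
    simp only [foldl_app1]
    simp

theorem gA_eq_gB : ∀ n : Nat, n < 127 → gA n = gB n := by decide

-- ===== VERDICT (by name: the statement is the Claim_ definition above) =====
theorem ASCII2bin_spec : Claim_equal_ASCII2bin := by
  intro msg hdom
  unfold Spec_ASCII2bin
  rw [A_flat, B_flat]
  apply flatMap_congr_mem
  intro ch hch
  apply gA_eq_gB
  have h := List.all_eq_true.mp hdom ch hch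
  simp only [pvDomChar, Bool.or_eq_true, Bool.and_eq_true, decide_eq_true_eq, beq_iff_eq] at h
  omega
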